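-- pv_equiv track=rewrite | github.com/1IssaMohamed/data-structurizer | backend/algorithms.py | heap_insert
-- ===== SOURCE A (Python) =====
-- def heap_insert(heap, val):
--     heap.append(val)
--     curr_idx = len(heap) - 1
--
--     # Sift up (Min Heap)
--     while curr_idx > 0:
--         parent_idx = (curr_idx - 1) // 2
--         if heap[curr_idx] < heap[parent_idx]:
--             # Swap
--             heap[curr_idx], heap[parent_idx] = heap[parent_idx], heap[curr_idx]
--             curr_idx = parent_idx
--         else:
--             break
--     return heap
-- ===== SOURCE B (Python) =====
-- def heap_insert(heap, val):
--     # Staged approach: precompute the ancestor chain of the new slot, count how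
--     # many ancestors must shift, then perform all writes in one batch pass.
--     heap.append(val)
--     chain = []
--     i = len(heap) - 1
--     while i > 0:
--         i = (i - 1) // 2
--         chain.append(i)
--     # how many ancestors, bottom-up, exceed val (they all shift down one level)
--     m = 0
--     while m < len(chain) and val < heap[chain[m]]:
--         m += 1
--     slots = [len(heap) - 1] + chain[:m]
--     new_vals = [heap[c] for c in chain[:m]] + [val]
--     for p, v in zip(slots, new_vals):
--         heap[p] = v
--     return heap
-- ===== Notes on version B (the rewrite author's own statement) =====
-- stated objective: alternative
-- what changed: Replaces A's single interleaved compare-and-swap sift-up loop by three staged passes: precompute the ancestor chain of the new slot, count how many ancestors exceed val, then apply all element moves in one batch write pass.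
import Mathlib
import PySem

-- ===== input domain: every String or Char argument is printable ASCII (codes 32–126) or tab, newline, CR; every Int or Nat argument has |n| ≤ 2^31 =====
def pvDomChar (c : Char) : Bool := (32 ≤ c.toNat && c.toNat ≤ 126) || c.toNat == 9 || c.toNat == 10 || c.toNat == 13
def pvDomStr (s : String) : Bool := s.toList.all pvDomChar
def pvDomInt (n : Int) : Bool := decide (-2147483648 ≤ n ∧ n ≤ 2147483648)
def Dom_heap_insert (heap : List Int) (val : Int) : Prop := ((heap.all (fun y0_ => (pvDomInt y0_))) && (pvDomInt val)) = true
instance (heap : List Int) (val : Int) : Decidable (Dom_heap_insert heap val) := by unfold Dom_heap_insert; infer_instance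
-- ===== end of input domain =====

-- B replaces A's interleaved compare-and-swap sift-up loop by three staged passes:
-- precompute the ancestor chain of the new slot, count how many ancestors exceed val,
-- then apply all element moves in one batch; same return value (objective: alternative).
-- Both Pythons mutate `heap` in place (append + index writes); the theorem is about
-- the return value.

-- ===== PORT A =====
-- A's while loop: swap heap[curr] with heap[parent] while heap[curr] < heap[parent].
-- Indices are always in range (0 ≤ (curr-1)/2 < curr < length), so list reads use getD.
def heap_insert_siftA (l : List Int) (curr : Nat) : List Int :=
  if curr > 0 then
    let p := (curr - 1) / 2
    if l.getD curr 0 < l.getD p 0 then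
      heap_insert_siftA ((l.set curr (l.getD p 0)).set p (l.getD curr 0)) p
    else l
  else l
termination_by curr
decreasing_by exact Nat.lt_of_le_of_lt (Nat.div_le_self _ _) (by omega)

def heap_insert (heap : List Int) (val : Int) : List Int :=
  heap_insert_siftA (heap ++ [val]) heap.length

-- ===== PORT B =====
-- B's first while loop: collect the ancestor chain of index i, bottom-up.
def heap_insert_chain (i : Nat) : List Nat :=
  if i > 0 then ((i - 1) / 2) :: heap_insert_chain ((i - 1) / 2) else []
termination_by i
decreasing_by exact Nat.lt_of_le_of_lt (Nat.div_le_self _ _) (by omega)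

-- B's second while loop: m counts the ancestors (bottom-up) whose value exceeds val.
def heap_insert_count (l : List Int) (val : Int) : List Nat → Nat
  | [] => 0
  | c :: rest => if val < l.getD c 0 then 1 + heap_insert_count l val rest else 0

-- B's batch-write pass (the zip loop over slots/new_vals).
def heap_insert_writes (l : List Int) (ps : List (Nat × Int)) : List Int :=
  ps.foldl (fun acc pv => acc.set pv.1 pv.2) l

def heap_insert_alt (heap : List Int) (val : Int) : List Int :=
  let l := heap ++ [val]
  let ch := heap_insert_chain heap.length
  let m := heap_insert_count l val ch
  let slots := heap.length :: ch.take m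
  let new_vals := (ch.take m).map (fun c => l.getD c 0) ++ [val]
  heap_insert_writes l (slots.zip new_vals)

-- ===== PRECONDITION & SPEC =====
def Spec_heap_insert (heap : List Int) (val : Int) (out : List Int) : Prop := out = heap_insert_alt heap val
instance (heap : List Int) (val : Int) (out : List Int) : Decidable (Spec_heap_insert heap val out) := by unfold Spec_heap_insert; infer_instance

-- ===== CLAIM (what is proved, stated in full; the proofs are below) =====
def Claim_equal_heap_insert : Prop := ∀ (heap : List Int) (val : Int), Dom_heap_insert heap val → Spec_heap_insert heap val (heap_insert heap val)

-- ===== LEMMAS AND PROOFS =====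

-- every ancestor in the chain of i lies strictly below i
theorem heap_insert_chain_lt (i : Nat) : ∀ c ∈ heap_insert_chain i, c < i := by
  induction i using Nat.strong_induction_on with
  | _ i ih =>
    rw [heap_insert_chain]
    by_cases hi : i > 0
    · simp only [hi, if_true]
      intro c hc
      have hp : (i - 1) / 2 < i := Nat.lt_of_le_of_lt (Nat.div_le_self _ _) (by omega)
      rcases List.mem_cons.mp hc with h | h
      · omega
      · exact lt_trans (ih _ hp c h) hp
    · simp [hi]

-- the count only reads indices in the chain
theorem heap_insert_count_congr (l l' : List Int) (val : Int) (ch : List Nat)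
    (h : ∀ c ∈ ch, l.getD c 0 = l'.getD c 0) :
    heap_insert_count l val ch = heap_insert_count l' val ch := by
  induction ch with
  | nil => rfl
  | cons c rest ih =>
    simp only [heap_insert_count]
    rw [h c (List.mem_cons_self), ih (fun c hc => h c (List.mem_cons.mpr (Or.inr hc)))]

-- KEY: A's swap sift-up from position curr (holding value l[curr]) equals B's
-- staged chain/count/batch-write computation.
theorem siftA_eq_staged (curr : Nat) (l : List Int) (h : curr < l.length) :
    heap_insert_siftA l curr =
      heap_insert_writes l
        ((curr :: (heap_insert_chain curr).take
            (heap_insert_count l (l.getD curr 0) (heap_insert_chain curr))).zip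
          (((heap_insert_chain curr).take
            (heap_insert_count l (l.getD curr 0) (heap_insert_chain curr))).map
              (fun c => l.getD c 0) ++ [l.getD curr 0])) := by
  induction curr using Nat.strong_induction_on generalizing l with
  | _ curr ih =>
    rw [heap_insert_siftA, heap_insert_chain]
    by_cases hc : curr > 0
    · simp only [hc, if_true]
      set p := (curr - 1) / 2 with hp
      have hplt : p < curr := Nat.lt_of_le_of_lt (Nat.div_le_self _ _) (by omega)
      have hpl : p < l.length := lt_trans hplt h
      by_cases hlt : l.getD curr 0 < l.getD p 0
      · simp only [hlt, if_true]
        set v := l.getD curr 0 with hv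
        set l' := (l.set curr (l.getD p 0)).set p v with hl'
        have hlen' : p < l'.length := by simp [hl', hpl]
        have hget' : l'.getD p 0 = v := by
          rw [List.getD_eq_getElem?_getD, hl', List.getElem?_set_self (by simpa using hpl)]
          simp
        -- chain indices are < p, so unchanged by the two sets
        have hcongr : ∀ c ∈ heap_insert_chain p, l'.getD c 0 = l.getD c 0 := by
          intro c hcmem
          have hclt : c < p := heap_insert_chain_lt p c hcmem
          rw [hl']
          simp only [List.getD_eq_getElem?_getD]
          rw [List.getElem?_set_ne (by omega), List.getElem?_set_ne (by omega)]
        rw [ih p hplt l' hlen', hget']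
        rw [heap_insert_count_congr l' l v _ hcongr]
        have hmap : (((heap_insert_chain p).take
              (heap_insert_count l v (heap_insert_chain p))).map (fun c => l'.getD c 0))
            = (((heap_insert_chain p).take
              (heap_insert_count l v (heap_insert_chain p))).map (fun c => l.getD c 0)) := by
          apply List.map_congr_left
          intro c hcmem
          exact hcongr c (List.mem_of_mem_take hcmem)
        rw [hmap]
        -- B side at curr: count = 1 + count at p (since v < l[p])
        have hcount : heap_insert_count l v (p :: heap_insert_chain p)
            = 1 + heap_insert_count l v (heap_insert_chain p) := by
          simp only [heap_insert_count]
          rw [if_pos hlt]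
        rw [hcount]
        set m := heap_insert_count l v (heap_insert_chain p) with hm
        have htake : (p :: heap_insert_chain p).take (1 + m)
            = p :: (heap_insert_chain p).take m := by
          simp [List.take_succ_cons, Nat.add_comm 1 m]
        rw [htake]
        -- first write of the batch fills curr with l[p]; set_set absorbs l''s second set
        rcases htk : (heap_insert_chain p).take m with _ | ⟨q, rest⟩
        · rw [hl']
          simp [heap_insert_writes]
        · simp only [List.map_cons, List.cons_append, List.zip_cons_cons,
            heap_insert_writes, List.foldl_cons]
          rw [hl', List.set_set]
      · simp only [hlt, if_false]
        -- A returns l; B's count is 0, single write puts l[curr] back at curr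
        have hcount : heap_insert_count l (l.getD curr 0) (p :: heap_insert_chain p) = 0 := by
          simp only [heap_insert_count]
          rw [if_neg hlt]
        rw [hcount]
        simp only [heap_insert_writes]
        rw [List.getD_eq_getElem?_getD, List.getElem?_eq_getElem h]
        simp [List.set_getElem_self]
    · simp only [hc, if_false]
      -- curr = 0: chain empty, count 0, single write of l[0] at 0
      simp only [heap_insert_writes]
      rw [List.getD_eq_getElem?_getD, List.getElem?_eq_getElem h]
      simp [List.set_getElem_self]

-- ===== VERDICT (by name: the statement is the Claim_ definition above) =====
theorem heap_insert_spec : Claim_equal_heap_insert := by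
  intro heap val _
  unfold Spec_heap_insert heap_insert heap_insert_alt
  have h : heap.length < (heap ++ [val]).length := by simp
  have hv : (heap ++ [val]).getD heap.length 0 = val := by
    rw [List.getD_eq_getElem?_getD, List.getElem?_eq_getElem h]
    simp
  rw [siftA_eq_staged heap.length _ h, hv]
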